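-- pv_equiv track=rewrite | github.com/MUKILAN0608/AI-Powered-RealTime-ASL-Recognition-and-Fluent-Sentence-Formation-Transformer-NLP | completed.py | correct_grammar
-- ===== SOURCE A (Python) =====
-- def correct_grammar(sentence):
--     """Apply comprehensive grammar corrections using BART-T5 transformer"""
--     if not sentence:
--         return sentence
--
--     # Apply basic grammar corrections directly
--     corrections = {
--         "i ": "I ",
--         " i ": " I ",
--         " i.": " I.",
--         " i!": " I!",
--         " i?": " I?",
--         " i,": " I,"
--     }
--
--     corrected = sentence
--     for wrong, right in corrections.items():
--         corrected = corrected.replace(wrong, right)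
--
--     return corrected
-- ===== SOURCE B (Python) =====
-- def correct_grammar(sentence):
--     """Apply comprehensive grammar corrections using BART-T5 transformer"""
--     # Single left-to-right scan: capitalize an 'i' that is followed by a space,
--     # or preceded by a space and followed by one of '.', '!', '?', ','.
--     out = []
--     prev = None
--     chars = list(sentence)
--     for j, c in enumerate(chars):
--         nxt = chars[j + 1] if j + 1 < len(chars) else None
--         if c == 'i' and (nxt == ' ' or (prev == ' ' and nxt in ('.', '!', '?', ','))):
--             out.append('I')
--         else:
--             out.append(c)
--         prev = c
--     return ''.join(out)
-- ===== Notes on version B (the rewrite author's own statement) =====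
-- stated objective: alternative
-- what changed: Replaces six sequential full-string .replace passes over a correction table with a single left-to-right character scan that capitalizes the letter using a one-char lookbehind (space) and lookahead (space or sentence punctuation).
import Mathlib
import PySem

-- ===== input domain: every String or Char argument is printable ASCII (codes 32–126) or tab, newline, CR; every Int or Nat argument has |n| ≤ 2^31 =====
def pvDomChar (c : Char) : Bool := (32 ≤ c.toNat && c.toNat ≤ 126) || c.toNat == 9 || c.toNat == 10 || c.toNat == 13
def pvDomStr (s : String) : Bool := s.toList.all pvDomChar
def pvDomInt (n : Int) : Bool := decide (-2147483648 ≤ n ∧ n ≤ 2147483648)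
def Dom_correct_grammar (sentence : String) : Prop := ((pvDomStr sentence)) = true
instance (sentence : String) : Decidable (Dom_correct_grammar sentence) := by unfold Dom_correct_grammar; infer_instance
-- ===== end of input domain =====

-- B replaces A's six sequential full-string .replace passes over a correction table
-- with a single left-to-right character scan (one-char lookbehind and lookahead).

-- ===== PORT A =====
def correct_grammar (sentence : String) : String :=
  if sentence = "" then sentence
  else
    -- Python dict literal with distinct keys → association list in insertion order
    let corrections : List (String × String) :=
      [("i ", "I "), (" i ", " I "), (" i.", " I."),
       (" i!", " I!"), (" i?", " I?"), (" i,", " I,")]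
    corrections.foldl (fun corrected wr => PySem.Str.replace corrected wr.1 wr.2) sentence

-- ===== PORT B =====
-- B's loop: prev = previous original char (None at start), nxt = one-char lookahead
def cgAltGo (prev : Option Char) : List Char → List Char
  | [] => []
  | c :: t =>
      (if c = 'i' ∧ (t.head? = some ' ' ∨
          (prev = some ' ' ∧ (t.head? = some '.' ∨ t.head? = some '!' ∨
                              t.head? = some '?' ∨ t.head? = some ','))) then 'I' else c)
        :: cgAltGo (some c) t

def correct_grammar_alt (sentence : String) : String :=
  String.ofList (cgAltGo none sentence.toList)

-- ===== PRECONDITION & SPEC =====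
def Spec_correct_grammar (sentence : String) (out : String) : Prop := out = correct_grammar_alt sentence
instance (sentence : String) (out : String) : Decidable (Spec_correct_grammar sentence out) := by unfold Spec_correct_grammar; infer_instance

-- ===== CLAIM (what is proved, stated in full; the proofs are below) =====
def Claim_equal_correct_grammar : Prop := ∀ (sentence : String), Dom_correct_grammar sentence → Spec_correct_grammar sentence (correct_grammar sentence)

-- ===== LEMMAS AND PROOFS =====

-- scan characterizing replace "i " → "I "
def scan1 : List Char → List Char
  | [] => []
  | c :: t => (if c = 'i' ∧ t.head? = some ' ' then 'I' else c) :: scan1 t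

-- scan characterizing replace " ix" → " Ix" for x ∈ {'.','!','?',','}
def scanP (x : Char) (p : Option Char) : List Char → List Char
  | [] => []
  | c :: t => (if p = some ' ' ∧ c = 'i' ∧ t.head? = some x then 'I' else c) :: scanP x (some c) t

-- "no 'i' immediately followed by ' '"
def noIS : List Char → Prop
  | [] => True
  | c :: t => ¬ (c = 'i' ∧ t.head? = some ' ') ∧ noIS t

lemma go1_eq (fuel : Nat) : ∀ (l acc : List Char), l.length ≤ fuel →
    PySem.Chars.replace.go ['i', ' '] ['I', ' '] fuel l acc = acc.reverse ++ scan1 l := by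
  induction fuel with
  | zero =>
    intro l acc h
    cases l with
    | nil => simp [PySem.Chars.replace.go, scan1]
    | cons c t => simp at h
  | succ n ih =>
    intro l acc h
    match l with
    | [] => simp [PySem.Chars.replace.go, scan1]
    | c :: t =>
      by_cases hpre : (['i', ' '] : List Char).isPrefixOf (c :: t)
      · match t, hpre with
        | [], hpre => simp [List.isPrefixOf] at hpre
        | d :: t', hpre =>
          simp [List.isPrefixOf] at hpre
          obtain ⟨hc, hd⟩ := hpre
          subst hc; subst hd
          rw [show PySem.Chars.replace.go ['i', ' '] ['I', ' '] (n+1) ('i' :: ' ' :: t') acc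
              = PySem.Chars.replace.go ['i', ' '] ['I', ' '] n t' ([' ', 'I'] ++ acc) by
            simp [PySem.Chars.replace.go, List.isPrefixOf]]
          rw [ih t' ([' ', 'I'] ++ acc) (by simp at h; omega)]
          simp [scan1]
      · rw [show PySem.Chars.replace.go ['i', ' '] ['I', ' '] (n+1) (c :: t) acc
            = PySem.Chars.replace.go ['i', ' '] ['I', ' '] n t (c :: acc) by
          simp only [PySem.Chars.replace.go]; rw [if_neg hpre]]
        rw [ih t (c :: acc) (by simp at h; omega)]
        have hc : ¬ (c = 'i' ∧ t.head? = some ' ') := by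
          rintro ⟨h1, h2⟩
          cases t with
          | nil => simp at h2
          | cons d t' =>
            simp at h2
            exact hpre (by simp [List.isPrefixOf, h1, h2])
        simp [scan1, hc]

lemma replace1_eq (l : List Char) :
    PySem.Chars.replace l ['i', ' '] ['I', ' '] = scan1 l := by
  have := go1_eq l.length l [] (le_refl _)
  simpa [PySem.Chars.replace] using this

-- pointwise descriptions -------------------------------------------------

def prevAt (p : Option Char) (l : List Char) (j : Nat) : Option Char :=
  if j = 0 then p else l[j-1]?

lemma prevAt_cons (p : Option Char) (c : Char) (t : List Char) (j : Nat) :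
    prevAt p (c :: t) (j + 1) = prevAt (some c) t j := by
  cases j with
  | zero => simp [prevAt]
  | succ k => simp [prevAt]

lemma scan1_getElem? (l : List Char) (j : Nat) :
    (scan1 l)[j]? = (l[j]?).map (fun c => if c = 'i' ∧ l[j+1]? = some ' ' then 'I' else c) := by
  induction l generalizing j with
  | nil => simp [scan1]
  | cons c t ih =>
    cases j with
    | zero => simp [scan1, List.head?_eq_getElem?]
    | succ k => simpa [scan1] using ih k

lemma scanP_getElem? (x : Char) (p : Option Char) (l : List Char) (j : Nat) :
    (scanP x p l)[j]? = (l[j]?).map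
      (fun c => if prevAt p l j = some ' ' ∧ c = 'i' ∧ l[j+1]? = some x then 'I' else c) := by
  induction l generalizing p j with
  | nil => simp [scanP]
  | cons c t ih =>
    cases j with
    | zero => simp [scanP, prevAt, List.head?_eq_getElem?]
    | succ k => simpa [scanP, prevAt_cons] using ih (some c) k

lemma cgAltGo_getElem? (p : Option Char) (l : List Char) (j : Nat) :
    (cgAltGo p l)[j]? = (l[j]?).map
      (fun c => if c = 'i' ∧ (l[j+1]? = some ' ' ∨
          (prevAt p l j = some ' ' ∧ (l[j+1]? = some '.' ∨ l[j+1]? = some '!' ∨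
            l[j+1]? = some '?' ∨ l[j+1]? = some ','))) then 'I' else c) := by
  induction l generalizing p j with
  | nil => simp [cgAltGo]
  | cons c t ih =>
    cases j with
    | zero => simp [cgAltGo, prevAt, List.head?_eq_getElem?]
    | succ k => simpa [cgAltGo, prevAt_cons] using ih (some c) k

-- the scans only rewrite 'i' to 'I'; every other char is observed unchanged
lemma map_guard (o : Option Char) (C : Char → Prop) [DecidablePred C]
    (hC : ∀ c, C c → c = 'i') (x : Char) (hx1 : x ≠ 'i') (hx2 : x ≠ 'I') :
    (o.map (fun c => if C c then 'I' else c) = some x) ↔ o = some x := by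
  cases o with
  | none => simp
  | some c =>
    simp only [Option.map_some, Option.some.injEq]
    constructor
    · intro h
      split at h
      · exact absurd h.symm hx2
      · rw [h]
    · rintro rfl
      rw [if_neg (fun hcc => hx1 (hC _ hcc))]

lemma scan1_obs (l : List Char) (j : Nat) (x : Char) (hx1 : x ≠ 'i') (hx2 : x ≠ 'I') :
    ((scan1 l)[j]? = some x) ↔ l[j]? = some x := by
  rw [scan1_getElem?]
  exact map_guard _ _ (fun c hc => hc.1) x hx1 hx2

lemma scanP_obs (y : Char) (p : Option Char) (l : List Char) (j : Nat) (x : Char)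
    (hx1 : x ≠ 'i') (hx2 : x ≠ 'I') :
    ((scanP y p l)[j]? = some x) ↔ l[j]? = some x := by
  rw [scanP_getElem?]
  exact map_guard _ _ (fun c hc => hc.2.1) x hx1 hx2

-- no "i " adjacency in scan1 output, so replace " i " → " I " is the identity there
lemma noIS_scan1 (l : List Char) : noIS (scan1 l) := by
  induction l with
  | nil => simp [scan1, noIS]
  | cons c t ih =>
    refine ⟨?_, ih⟩
    rintro ⟨h1, h2⟩
    rw [List.head?_eq_getElem?, scan1_obs t 0 ' ' (by decide) (by decide),
        ← List.head?_eq_getElem?] at h2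
    split at h1
    · exact absurd h1 (by decide)
    · rename_i hcond; exact hcond ⟨h1, h2⟩

lemma go2_eq (fuel : Nat) : ∀ (l acc : List Char), l.length ≤ fuel → noIS l →
    PySem.Chars.replace.go [' ', 'i', ' '] [' ', 'I', ' '] fuel l acc = acc.reverse ++ l := by
  induction fuel with
  | zero =>
    intro l acc h _
    cases l with
    | nil => simp [PySem.Chars.replace.go]
    | cons c t => simp at h
  | succ n ih =>
    intro l acc h hn
    match l with
    | [] => simp [PySem.Chars.replace.go]
    | c :: t =>
      have hpre : ¬ ([' ', 'i', ' '] : List Char).isPrefixOf (c :: t) := by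
        intro hp
        match t, hp with
        | d :: e :: t', hp =>
          simp [List.isPrefixOf] at hp
          exact hn.2.1 ⟨hp.2.1.symm, by rw [List.head?]; rw [← hp.2.2]⟩
        | [d], hp => simp [List.isPrefixOf] at hp
        | [], hp => simp [List.isPrefixOf] at hp
      rw [show PySem.Chars.replace.go [' ', 'i', ' '] [' ', 'I', ' '] (n+1) (c :: t) acc
          = PySem.Chars.replace.go [' ', 'i', ' '] [' ', 'I', ' '] n t (c :: acc) by
        simp only [PySem.Chars.replace.go]; rw [if_neg hpre]]
      rw [ih t (c :: acc) (by simp at h; omega) hn.2]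
      simp

lemma replace2_eq (l : List Char) (hn : noIS l) :
    PySem.Chars.replace l [' ', 'i', ' '] [' ', 'I', ' '] = l := by
  have := go2_eq l.length l [] (le_refl _) hn
  simpa [PySem.Chars.replace] using this

lemma goP_eq (x : Char) (hx1 : x ≠ ' ') (hx2 : x ≠ 'i') (fuel : Nat) :
    ∀ (l acc : List Char) (p : Option Char), l.length ≤ fuel →
    (p = some ' ' → ∀ t', l ≠ 'i' :: x :: t') →
    PySem.Chars.replace.go [' ', 'i', x] [' ', 'I', x] fuel l acc = acc.reverse ++ scanP x p l := by
  induction fuel with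
  | zero =>
    intro l acc p h _
    cases l with
    | nil => simp [PySem.Chars.replace.go, scanP]
    | cons c t => simp at h
  | succ n ih =>
    intro l acc p h hp
    match l with
    | [] => simp [PySem.Chars.replace.go, scanP]
    | c :: t =>
      by_cases hpre : ([' ', 'i', x] : List Char).isPrefixOf (c :: t)
      · match t, hpre with
        | d :: e :: t', hpre =>
          simp [List.isPrefixOf] at hpre
          obtain ⟨hc, hd, he⟩ := hpre
          subst hc; subst hd; subst he
          rw [show PySem.Chars.replace.go [' ', 'i', x] [' ', 'I', x] (n+1) (' ' :: 'i' :: x :: t') acc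
              = PySem.Chars.replace.go [' ', 'i', x] [' ', 'I', x] n t' ([x, 'I', ' '] ++ acc) by
            simp [PySem.Chars.replace.go, List.isPrefixOf]]
          rw [ih t' ([x, 'I', ' '] ++ acc) (some x) (by simp at h; omega)
              (by intro hx'; exact absurd (Option.some.inj hx') hx1)]
          have hxi : ¬ ((x : Char) = 'i') := hx2
          simp [scanP, hx2]
        | [d], hpre => simp [List.isPrefixOf] at hpre
        | [], hpre => simp [List.isPrefixOf] at hpre
      · rw [show PySem.Chars.replace.go [' ', 'i', x] [' ', 'I', x] (n+1) (c :: t) acc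
            = PySem.Chars.replace.go [' ', 'i', x] [' ', 'I', x] n t (c :: acc) by
          simp only [PySem.Chars.replace.go]; rw [if_neg hpre]]
        rw [ih t (c :: acc) (some c) (by simp at h; omega)
            (by intro hc t' ht'
                apply hpre
                have : c = ' ' := Option.some.inj hc
                subst this; subst ht'; simp [List.isPrefixOf])]
        have hcnd : ¬ (p = some ' ' ∧ c = 'i' ∧ t.head? = some x) := by
          rintro ⟨h1, h2, h3⟩
          cases t with
          | nil => simp at h3
          | cons y t' =>
            simp at h3
            exact hp h1 t' (by rw [h2, h3])
        simp [scanP, hcnd]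

lemma replaceP_eq (x : Char) (hx1 : x ≠ ' ') (hx2 : x ≠ 'i') (l : List Char) :
    PySem.Chars.replace l [' ', 'i', x] [' ', 'I', x] = scanP x none l := by
  have := goP_eq x hx1 hx2 l.length l [] none (le_refl _) (by simp)
  simpa [PySem.Chars.replace] using this

-- prev-observation through a stage
lemma prevAt_scan1 (l : List Char) (j : Nat) :
    (prevAt none (scan1 l) j = some ' ') ↔ (prevAt none l j = some ' ') := by
  cases j with
  | zero => simp [prevAt]
  | succ k => simpa [prevAt] using scan1_obs l k ' ' (by decide) (by decide)

lemma prevAt_scanP (y : Char) (l : List Char) (j : Nat) :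
    (prevAt none (scanP y none l) j = some ' ') ↔ (prevAt none l j = some ' ') := by
  cases j with
  | zero => simp [prevAt]
  | succ k => simpa [prevAt] using scanP_obs y none l k ' ' (by decide) (by decide)

-- the composed scans equal B's single scan
lemma comp_eq (l : List Char) :
    scanP ',' none (scanP '?' none (scanP '!' none (scanP '.' none (scan1 l)))) = cgAltGo none l := by
  apply List.ext_getElem?
  intro j
  rcases h0 : l[j]? with _ | c
  · simp only [cgAltGo_getElem?, scanP_getElem?, scan1_getElem?, h0, Option.map_none]
  · have g1 : (scan1 l)[j]? = some (if c = 'i' ∧ l[j+1]? = some ' ' then 'I' else c) := by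
      rw [scan1_getElem?, h0]; rfl
    have g2 : (scanP '.' none (scan1 l))[j]? = some
        (if prevAt none l j = some ' ' ∧
            (if c = 'i' ∧ l[j+1]? = some ' ' then 'I' else c) = 'i' ∧ l[j+1]? = some '.'
          then 'I' else (if c = 'i' ∧ l[j+1]? = some ' ' then 'I' else c)) := by
      rw [scanP_getElem?, g1]
      simp only [Option.map_some, prevAt_scan1,
        scan1_obs l (j+1) '.' (by decide) (by decide)]
    generalize hA : (if c = 'i' ∧ l[j+1]? = some ' ' then 'I' else c) = c1 at g2
    have g3 : (scanP '!' none (scanP '.' none (scan1 l)))[j]? = some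
        (if prevAt none l j = some ' ' ∧
            (if prevAt none l j = some ' ' ∧ c1 = 'i' ∧ l[j+1]? = some '.' then 'I' else c1) = 'i' ∧
              l[j+1]? = some '!'
          then 'I'
          else (if prevAt none l j = some ' ' ∧ c1 = 'i' ∧ l[j+1]? = some '.' then 'I' else c1)) := by
      rw [scanP_getElem?, g2]
      simp only [Option.map_some, prevAt_scanP, prevAt_scan1,
        scanP_obs '.' none (scan1 l) (j+1) '!' (by decide) (by decide),
        scan1_obs l (j+1) '!' (by decide) (by decide)]
    generalize hB : (if prevAt none l j = some ' ' ∧ c1 = 'i' ∧ l[j+1]? = some '.' then 'I' else c1) = c2 at g3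
    have g4 : (scanP '?' none (scanP '!' none (scanP '.' none (scan1 l))))[j]? = some
        (if prevAt none l j = some ' ' ∧
            (if prevAt none l j = some ' ' ∧ c2 = 'i' ∧ l[j+1]? = some '!' then 'I' else c2) = 'i' ∧
              l[j+1]? = some '?'
          then 'I'
          else (if prevAt none l j = some ' ' ∧ c2 = 'i' ∧ l[j+1]? = some '!' then 'I' else c2)) := by
      rw [scanP_getElem?, g3]
      simp only [Option.map_some, prevAt_scanP, prevAt_scan1,
        scanP_obs '!' none _ (j+1) '?' (by decide) (by decide),
        scanP_obs '.' none _ (j+1) '?' (by decide) (by decide),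
        scan1_obs l (j+1) '?' (by decide) (by decide)]
    generalize hC : (if prevAt none l j = some ' ' ∧ c2 = 'i' ∧ l[j+1]? = some '!' then 'I' else c2) = c3 at g4
    have g5 : (scanP ',' none (scanP '?' none (scanP '!' none (scanP '.' none (scan1 l)))))[j]? = some
        (if prevAt none l j = some ' ' ∧
            (if prevAt none l j = some ' ' ∧ c3 = 'i' ∧ l[j+1]? = some '?' then 'I' else c3) = 'i' ∧
              l[j+1]? = some ','
          then 'I'
          else (if prevAt none l j = some ' ' ∧ c3 = 'i' ∧ l[j+1]? = some '?' then 'I' else c3)) := by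
      rw [scanP_getElem?, g4]
      simp only [Option.map_some, prevAt_scanP, prevAt_scan1,
        scanP_obs '?' none _ (j+1) ',' (by decide) (by decide),
        scanP_obs '!' none _ (j+1) ',' (by decide) (by decide),
        scanP_obs '.' none _ (j+1) ',' (by decide) (by decide),
        scan1_obs l (j+1) ',' (by decide) (by decide)]
    generalize hD : (if prevAt none l j = some ' ' ∧ c3 = 'i' ∧ l[j+1]? = some '?' then 'I' else c3) = c4 at g5
    rw [g5, cgAltGo_getElem?, h0]
    simp only [Option.map_some, Option.some.injEq]
    -- finite case analysis over the original characters
    by_cases hc : c = 'i'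
    · subst hc
      have keepI : ∀ (Q R : Prop) (_ : Decidable Q) (_ : Decidable R) (a : Char), a = 'I' →
          (if Q ∧ a = 'i' ∧ R then 'I' else a) = 'I' := by
        rintro Q R _ _ a rfl
        rw [if_neg (by rintro ⟨_, h, _⟩; exact absurd h (by decide))]
      by_cases hsp : l[j+1]? = some ' '
      · have e1 : c1 = 'I' := by rw [← hA, if_pos ⟨rfl, hsp⟩]
        have e2 : c2 = 'I' := by rw [← hB]; exact keepI _ _ _ _ _ e1
        have e3 : c3 = 'I' := by rw [← hC]; exact keepI _ _ _ _ _ e2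
        have e4 : c4 = 'I' := by rw [← hD]; exact keepI _ _ _ _ _ e3
        rw [keepI _ _ _ _ _ e4, if_pos ⟨rfl, Or.inl hsp⟩]
      · have e1 : c1 = 'i' := by rw [← hA, if_neg (fun h => hsp h.2)]
        by_cases hq : prevAt none l j = some ' '
        · by_cases hd : l[j+1]? = some '.'
          · have e2 : c2 = 'I' := by rw [← hB, if_pos ⟨hq, e1, hd⟩]
            have e3 : c3 = 'I' := by rw [← hC]; exact keepI _ _ _ _ _ e2
            have e4 : c4 = 'I' := by rw [← hD]; exact keepI _ _ _ _ _ e3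
            rw [keepI _ _ _ _ _ e4, if_pos ⟨rfl, Or.inr ⟨hq, Or.inl hd⟩⟩]
          · have e2 : c2 = 'i' := by rw [← hB, if_neg (fun h => hd h.2.2), e1]
            by_cases he : l[j+1]? = some '!'
            · have e3 : c3 = 'I' := by rw [← hC, if_pos ⟨hq, e2, he⟩]
              have e4 : c4 = 'I' := by rw [← hD]; exact keepI _ _ _ _ _ e3
              rw [keepI _ _ _ _ _ e4, if_pos ⟨rfl, Or.inr ⟨hq, Or.inr (Or.inl he)⟩⟩]
            · have e3 : c3 = 'i' := by rw [← hC, if_neg (fun h => he h.2.2), e2]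
              by_cases hf : l[j+1]? = some '?'
              · have e4 : c4 = 'I' := by rw [← hD, if_pos ⟨hq, e3, hf⟩]
                rw [keepI _ _ _ _ _ e4, if_pos ⟨rfl, Or.inr ⟨hq, Or.inr (Or.inr (Or.inl hf))⟩⟩]
              · have e4 : c4 = 'i' := by rw [← hD, if_neg (fun h => hf h.2.2), e3]
                by_cases hg : l[j+1]? = some ','
                · rw [if_pos ⟨hq, e4, hg⟩,
                      if_pos ⟨rfl, Or.inr ⟨hq, Or.inr (Or.inr (Or.inr hg))⟩⟩]
                · rw [if_neg (fun h => hg h.2.2), e4,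
                      if_neg (by
                        rintro ⟨_, h | ⟨_, h | h | h | h⟩⟩
                        · exact hsp h
                        · exact hd h
                        · exact he h
                        · exact hf h
                        · exact hg h)]
        · have e1' : c2 = 'i' := by rw [← hB, if_neg (fun h => hq h.1), e1]
          have e2' : c3 = 'i' := by rw [← hC, if_neg (fun h => hq h.1), e1']
          have e3' : c4 = 'i' := by rw [← hD, if_neg (fun h => hq h.1), e2']
          rw [if_neg (fun h => hq h.1), e3',
              if_neg (by rintro ⟨_, h | ⟨hP, _⟩⟩; exact hsp h; exact hq hP)]
    · have hc1 : c1 = c := by rw [← hA, if_neg (fun h => hc h.1)]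
      have hc2 : c2 = c := by rw [← hB, hc1, if_neg (fun h => hc h.2.1)]
      have hc3 : c3 = c := by rw [← hC, hc2, if_neg (fun h => hc h.2.1)]
      have hc4 : c4 = c := by rw [← hD, hc3, if_neg (fun h => hc h.2.1)]
      rw [hc4, if_neg (fun h => hc h.2.1), if_neg (fun h => hc h.1)]

-- assemble at the String level
lemma main_eq (s : String) : correct_grammar s = correct_grammar_alt s := by
  by_cases hs : s = ""
  · subst hs
    rfl
  · unfold correct_grammar correct_grammar_alt
    rw [if_neg hs]
    simp only [List.foldl]
    apply String.toList_inj.mp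
    rw [PySem.Str.toList_replace, PySem.Str.toList_replace, PySem.Str.toList_replace,
        PySem.Str.toList_replace, PySem.Str.toList_replace, PySem.Str.toList_replace]
    have h1 : ("i " : String).toList = ['i', ' '] := by decide
    have h2 : ("I " : String).toList = ['I', ' '] := by decide
    have h3 : (" i " : String).toList = [' ', 'i', ' '] := by decide
    have h4 : (" I " : String).toList = [' ', 'I', ' '] := by decide
    have h5 : (" i." : String).toList = [' ', 'i', '.'] := by decide
    have h6 : (" I." : String).toList = [' ', 'I', '.'] := by decide
    have h7 : (" i!" : String).toList = [' ', 'i', '!'] := by decide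
    have h8 : (" I!" : String).toList = [' ', 'I', '!'] := by decide
    have h9 : (" i?" : String).toList = [' ', 'i', '?'] := by decide
    have h10 : (" I?" : String).toList = [' ', 'I', '?'] := by decide
    have h11 : (" i," : String).toList = [' ', 'i', ','] := by decide
    have h12 : (" I," : String).toList = [' ', 'I', ','] := by decide
    rw [h1, h2, h3, h4, h5, h6, h7, h8, h9, h10, h11, h12]
    rw [replace1_eq, replace2_eq _ (noIS_scan1 _)]
    rw [replaceP_eq '.' (by decide) (by decide), replaceP_eq '!' (by decide) (by decide),
        replaceP_eq '?' (by decide) (by decide), replaceP_eq ',' (by decide) (by decide)]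
    rw [comp_eq]
    simp

-- ===== VERDICT (by name: the statement is the Claim_ definition above) =====
theorem correct_grammar_spec : Claim_equal_correct_grammar := by
  intro sentence _
  unfold Spec_correct_grammar
  exact main_eq sentence
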